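-- pv_equiv track=rewrite | github.com/shashjar/advent-of-code | 2024/day12/p2-solution.py | calculate_fencing_price
-- ===== SOURCE A (Python) =====
-- DIRECTIONS = [(1, 0), (0, 1), (-1, 0), (0, -1)]
--
-- def on_grid(pos, matrix):
--     return pos[0] >= 0 and pos[0] < len(matrix) and pos[1] >= 0 and pos[1] < len(matrix[0])
--
-- def same_plant_type(r1, c1, r2, c2, matrix):
--     return matrix[r1][c1] == matrix[r2][c2]
--
-- def get_neighbors(r, c, matrix):
--     neighbors = []
--     for direction in DIRECTIONS:
--         neighbor = (r + direction[0], c + direction[1])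
--         if on_grid(neighbor, matrix) and same_plant_type(r, c, neighbor[0], neighbor[1], matrix):
--             neighbors.append(neighbor)
--     return neighbors
--
-- def dfs(r, c, visited, matrix):
--     visited.add((r, c))
--
--     region_positions = set()
--     region_positions.add((r, c))
--
--     neighbors = get_neighbors(r, c, matrix)
--     for neighbor in neighbors:
--         if neighbor not in visited:
--             neighbor_region_positions = dfs(neighbor[0], neighbor[1], visited, matrix)
--             region_positions.update(neighbor_region_positions)
--
--     return region_positions
--
-- def count_corners(positions):
--     num_corners = 0
--     for position in positions:
--         r, c = position[0], position[1]
--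
--         # Outer corners
--         num_corners += (r - 1, c) not in positions and (r, c - 1) not in positions
--         num_corners += (r + 1, c) not in positions and (r, c - 1) not in positions
--         num_corners += (r - 1, c) not in positions and (r, c + 1) not in positions
--         num_corners += (r + 1, c) not in positions and (r, c + 1) not in positions
--
--         # Inner corners
--         num_corners += (r - 1, c) in positions and (r, c - 1) in positions and (r - 1, c - 1) not in positions
--         num_corners += (r + 1, c) in positions and (r, c - 1) in positions and (r + 1, c - 1) not in positions
--         num_corners += (r - 1, c) in positions and (r, c + 1) in positions and (r - 1, c + 1) not in positions
--         num_corners += (r + 1, c) in positions and (r, c + 1) in positions and (r + 1, c + 1) not in positions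
--
--     return num_corners
--
-- def calculate_fencing_price(matrix):
--     price = 0
--     visited = set()
--
--     for r in range(len(matrix)):
--         for c in range(len(matrix[0])):
--             if (r, c) not in visited:
--                 region_positions = dfs(r, c, visited, matrix)
--                 area = len(region_positions)
--                 sides = count_corners(region_positions)
--                 price += area * sides
--
--     return price
-- ===== SOURCE B (Python) =====
-- def calculate_fencing_price(matrix):
--     height = len(matrix)
--     width = len(matrix[0]) if matrix else 0
--     visited = set()
--     price = 0
--     for r in range(height):
--         for c in range(width):
--             if (r, c) in visited:
--                 continue
--             # iterative flood fill with an explicit stack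
--             visited.add((r, c))
--             region = {(r, c)}
--             stack = [(r, c)]
--             while stack:
--                 pr, pc = stack.pop()
--                 for nr, nc in ((pr + 1, pc), (pr - 1, pc), (pr, pc + 1), (pr, pc - 1)):
--                     if 0 <= nr < height and 0 <= nc < width \
--                             and (nr, nc) not in visited \
--                             and matrix[nr][nc] == matrix[pr][pc]:
--                         visited.add((nr, nc))
--                         region.add((nr, nc))
--                         stack.append((nr, nc))
--             # sides by classifying each lattice vertex from its 2x2 cell pattern
--             corners = set()
--             for (cr, cc) in region:
--                 corners.update(((cr, cc), (cr, cc + 1), (cr + 1, cc), (cr + 1, cc + 1)))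
--             sides = 0
--             for (vr, vc) in corners:
--                 nw = (vr - 1, vc - 1) in region
--                 ne = (vr - 1, vc) in region
--                 sw = (vr, vc - 1) in region
--                 se = (vr, vc) in region
--                 n = nw + ne + sw + se
--                 if n == 1 or n == 3:
--                     sides += 1
--                 elif n == 2 and nw == se:
--                     sides += 2
--             price += len(region) * sides
--     return price
-- ===== Notes on version B (the rewrite author's own statement) =====
-- stated objective: alternative
-- what changed: Recursive DFS region discovery is replaced by an iterative stack-based flood fill, and the number of sides is computed by classifying each lattice vertex from the 2x2 membership pattern of its surrounding cells instead of A's eight per-cell corner tests.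
import Mathlib
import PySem

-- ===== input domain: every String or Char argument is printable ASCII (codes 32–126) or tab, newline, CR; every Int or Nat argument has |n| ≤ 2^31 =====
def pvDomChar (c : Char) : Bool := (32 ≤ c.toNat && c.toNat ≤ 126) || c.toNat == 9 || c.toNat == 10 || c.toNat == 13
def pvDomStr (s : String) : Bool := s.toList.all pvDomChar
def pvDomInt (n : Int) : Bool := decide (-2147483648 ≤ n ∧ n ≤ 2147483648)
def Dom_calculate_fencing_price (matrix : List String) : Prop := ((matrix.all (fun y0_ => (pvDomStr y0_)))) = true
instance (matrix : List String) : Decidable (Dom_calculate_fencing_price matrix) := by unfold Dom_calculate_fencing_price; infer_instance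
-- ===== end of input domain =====

-- B replaces A's recursive DFS by an iterative stack flood fill and counts sides by
-- classifying lattice vertices from their 2x2 cell pattern instead of A's 8 per-cell
-- corner tests (objective: alternative algorithm, similar cost).

-- ===== PORT A =====

-- matrix[r][c] as an Option (none = IndexError; all uses below are guarded in range)
def pvCharAt (matrix : List String) (r c : Int) : Option Char :=
  (PySem.List.pyGet? matrix r).bind (fun s => PySem.Str.pyGet? s c)

-- len(matrix[0]); in Python this is only evaluated when matrix ≠ [] (headD is exact there)
def pvWidth (matrix : List String) : Int := PySem.Str.len (matrix.headD "")

def DIRECTIONS : List (Int × Int) := [(1, 0), (0, 1), (-1, 0), (0, -1)]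

def on_grid (pos : Int × Int) (matrix : List String) : Bool :=
  decide (0 ≤ pos.1) && decide (pos.1 < (matrix.length : Int)) &&
  decide (0 ≤ pos.2) && decide (pos.2 < pvWidth matrix)

def same_plant_type (r1 c1 r2 c2 : Int) (matrix : List String) : Bool :=
  pvCharAt matrix r1 c1 == pvCharAt matrix r2 c2

def get_neighbors (r c : Int) (matrix : List String) : List (Int × Int) :=
  DIRECTIONS.foldl (fun neighbors d =>
    let neighbor := (r + d.1, c + d.2)
    if on_grid neighbor matrix && same_plant_type r c neighbor.1 neighbor.2 matrix then
      neighbors ++ [neighbor]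
    else neighbors) []

-- dfs, with a fuel guard making the recursion total (none = fuel exhausted; proven unreachable)
mutual
def dfsCore (matrix : List String) : Nat → Int → Int → PySem.Set (Int × Int) →
    Option (PySem.Set (Int × Int) × PySem.Set (Int × Int))
  | 0, _, _, _ => none
  | fuel + 1, r, c, visited =>
      let visited := PySem.Set.add visited (r, c)
      let region := PySem.Set.add PySem.Set.empty (r, c)
      dfsGo matrix fuel (get_neighbors r c matrix) region visited
  termination_by fuel _ _ _ => (fuel, 0)
  decreasing_by
    · exact Prod.Lex.left _ _ (Nat.lt_succ_self _)

def dfsGo (matrix : List String) : Nat → List (Int × Int) → PySem.Set (Int × Int) →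
    PySem.Set (Int × Int) → Option (PySem.Set (Int × Int) × PySem.Set (Int × Int))
  | _, [], region, visited => some (region, visited)
  | fuel, n :: rest, region, visited =>
      if n ∈ visited then dfsGo matrix fuel rest region visited
      else
        match dfsCore matrix fuel n.1 n.2 visited with
        | none => none
        | some (nregion, nvisited) =>
            dfsGo matrix fuel rest (PySem.Set.update region nregion) nvisited
  termination_by fuel lst _ _ => (fuel, lst.length + 1)
  decreasing_by
    · exact Prod.Lex.right _ (Nat.lt_succ_self _)
    · exact Prod.Lex.right _ (Nat.succ_pos _)
    · exact Prod.Lex.right _ (Nat.lt_succ_self _)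
end

def count_corners (positions : PySem.Set (Int × Int)) : Int :=
  positions.foldl (fun num_corners p =>
    let r := p.1; let c := p.2
    let o1 : Int := if (r - 1, c) ∉ positions ∧ (r, c - 1) ∉ positions then 1 else 0
    let o2 : Int := if (r + 1, c) ∉ positions ∧ (r, c - 1) ∉ positions then 1 else 0
    let o3 : Int := if (r - 1, c) ∉ positions ∧ (r, c + 1) ∉ positions then 1 else 0
    let o4 : Int := if (r + 1, c) ∉ positions ∧ (r, c + 1) ∉ positions then 1 else 0
    let i1 : Int := if (r - 1, c) ∈ positions ∧ (r, c - 1) ∈ positions ∧ (r - 1, c - 1) ∉ positions then 1 else 0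
    let i2 : Int := if (r + 1, c) ∈ positions ∧ (r, c - 1) ∈ positions ∧ (r + 1, c - 1) ∉ positions then 1 else 0
    let i3 : Int := if (r - 1, c) ∈ positions ∧ (r, c + 1) ∈ positions ∧ (r - 1, c + 1) ∉ positions then 1 else 0
    let i4 : Int := if (r + 1, c) ∈ positions ∧ (r, c + 1) ∈ positions ∧ (r + 1, c + 1) ∉ positions then 1 else 0
    num_corners + o1 + o2 + o3 + o4 + i1 + i2 + i3 + i4) 0

def calculate_fencing_price (matrix : List String) : Int :=
  let fuel : Nat := matrix.length * (pvWidth matrix).toNat + 1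
  (( PySem.List.pyRange 0 (matrix.length : Int) 1 ).foldl (fun st r =>
    ( PySem.List.pyRange 0 (pvWidth matrix) 1 ).foldl (fun st c =>
      if (r, c) ∈ st.2 then st
      else
        match dfsCore matrix fuel r c st.2 with
        | none => st
        | some (region_positions, visited) =>
            let area : Int := PySem.Set.len region_positions
            let sides : Int := count_corners region_positions
            (st.1 + area * sides, visited)) st) ((0 : Int), (PySem.Set.empty : PySem.Set (Int × Int)))).1

-- ===== PORT B =====

-- one iteration of B's while-loop pops the top of the stack and scans the 4 neighbours
-- (fuel guard for totality; none = fuel exhausted, proven unreachable)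
def fillLoop (matrix : List String) (height width : Int) :
    Nat → List (Int × Int) → PySem.Set (Int × Int) → PySem.Set (Int × Int) →
    Option (PySem.Set (Int × Int) × PySem.Set (Int × Int))
  | _, [], region, visited => some (region, visited)
  | 0, _ :: _, _, _ => none
  | fuel + 1, p :: stack, region, visited =>
      let st := [(p.1 + 1, p.2), (p.1 - 1, p.2), (p.1, p.2 + 1), (p.1, p.2 - 1)].foldl
        (fun (st : PySem.Set (Int × Int) × PySem.Set (Int × Int) × List (Int × Int)) q =>
          if 0 ≤ q.1 ∧ q.1 < height ∧ 0 ≤ q.2 ∧ q.2 < width ∧ q ∉ st.1 ∧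
             pvCharAt matrix q.1 q.2 = pvCharAt matrix p.1 p.2 then
            (PySem.Set.add st.1 q, PySem.Set.add st.2.1 q, q :: st.2.2)
          else st) (visited, region, stack)
      fillLoop matrix height width fuel st.2.2 st.2.1 st.1

def count_sides (region : PySem.Set (Int × Int)) : Int :=
  let corners : PySem.Set (Int × Int) := region.foldl (fun cs p =>
    PySem.Set.update cs [(p.1, p.2), (p.1, p.2 + 1), (p.1 + 1, p.2), (p.1 + 1, p.2 + 1)])
    PySem.Set.empty
  corners.foldl (fun sides v =>
    let nw := decide ((v.1 - 1, v.2 - 1) ∈ region)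
    let ne := decide ((v.1 - 1, v.2) ∈ region)
    let sw := decide ((v.1, v.2 - 1) ∈ region)
    let se := decide ((v.1, v.2) ∈ region)
    let n : Int := (if nw then 1 else 0) + (if ne then 1 else 0) +
                   (if sw then 1 else 0) + (if se then 1 else 0)
    if n = 1 ∨ n = 3 then sides + 1
    else if n = 2 ∧ nw = se then sides + 2
    else sides) 0

def calculate_fencing_price_alt (matrix : List String) : Int :=
  let height : Int := matrix.length
  let width : Int := pvWidth matrix
  let fuel : Nat := 2 * matrix.length * (pvWidth matrix).toNat + 2
  (( PySem.List.pyRange 0 height 1 ).foldl (fun st r =>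
    ( PySem.List.pyRange 0 width 1 ).foldl (fun st c =>
      if (r, c) ∈ st.2 then st
      else
        match fillLoop matrix height width fuel [(r, c)]
            (PySem.Set.add PySem.Set.empty (r, c)) (PySem.Set.add st.2 (r, c)) with
        | none => st
        | some (region, visited) =>
            (st.1 + PySem.Set.len region * count_sides region, visited)) st) ((0 : Int), (PySem.Set.empty : PySem.Set (Int × Int)))).1

-- ===== PRECONDITION & SPEC =====
-- Pre_ excludes exactly the matrices on which A raises IndexError: some row is shorter
-- than the first row (every cell (r,c) with c < len(matrix[0]) is read by A).
def Pre_calculate_fencing_price (matrix : List String) : Prop :=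
  ∀ s ∈ matrix, PySem.Str.len (matrix.headD "") ≤ PySem.Str.len s
instance (matrix : List String) : Decidable (Pre_calculate_fencing_price matrix) := by
  unfold Pre_calculate_fencing_price; infer_instance

def pvWitness_calculate_fencing_price : List String := ["AAB", "ABB"]

def Spec_calculate_fencing_price (matrix : List String) (out : Int) : Prop :=
  out = calculate_fencing_price_alt matrix
instance (matrix : List String) (out : Int) : Decidable (Spec_calculate_fencing_price matrix out) := by
  unfold Spec_calculate_fencing_price; infer_instance

-- ===== CLAIM (what is proved, stated in full; the proofs are below) =====
def Claim_equal_calculate_fencing_price : Prop := ∀ (matrix : List String),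
  Dom_calculate_fencing_price matrix → Pre_calculate_fencing_price matrix →
  Spec_calculate_fencing_price matrix (calculate_fencing_price matrix)

-- ===== LEMMAS AND PROOFS =====

-- ---------- generic helpers ----------

lemma pv_foldl_rel {α β γ : Type} (R : α → β → Prop) (f : α → γ → α) (g : β → γ → β) :
    ∀ (l : List γ) (a : α) (b : β), R a b →
      (∀ a b x, x ∈ l → R a b → R (f a x) (g b x)) → R (l.foldl f a) (l.foldl g b) := by
  intro l
  induction l with
  | nil => intro a b h _; exact h
  | cons x l ih =>
      intro a b h hs
      exact ih (f a x) (g b x) (hs a b x (by simp) h)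
        (fun a b y hy hr => hs a b y (by simp [hy]) hr)

lemma pv_foldl_append_if {γ : Type} (F : γ → Int × Int) (P : Int × Int → Bool) :
    ∀ (l : List γ) (init : List (Int × Int)),
      l.foldl (fun acc d => if P (F d) then acc ++ [F d] else acc) init =
        init ++ (l.filter (fun d => P (F d))).map F := by
  intro l
  induction l with
  | nil => intro init; simp
  | cons d l ih =>
      intro init
      by_cases h : P (F d) = true
      · simp [h, ih]
      · simp [h, ih]

-- ---------- adjacency and reachability ----------

def pvOnG (matrix : List String) (p : Int × Int) : Prop :=
  0 ≤ p.1 ∧ p.1 < (matrix.length : Int) ∧ 0 ≤ p.2 ∧ p.2 < pvWidth matrix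

def pvAdj (matrix : List String) (p q : Int × Int) : Prop :=
  pvOnG matrix q ∧ pvCharAt matrix q.1 q.2 = pvCharAt matrix p.1 p.2 ∧
    (q = (p.1 + 1, p.2) ∨ q = (p.1 - 1, p.2) ∨ q = (p.1, p.2 + 1) ∨ q = (p.1, p.2 - 1))

def pvReach (matrix : List String) (V : List (Int × Int)) (s p : Int × Int) : Prop :=
  Relation.ReflTransGen (fun a b => pvAdj matrix a b ∧ b ∉ V) s p

lemma pvReach_mono {matrix : List String} {V0 V : List (Int × Int)} {s p : Int × Int}
    (h : ∀ x ∈ V0, x ∈ V) : pvReach matrix V s p → pvReach matrix V0 s p :=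
  Relation.ReflTransGen.mono (fun _ _ hab => ⟨hab.1, fun hx => hab.2 (h _ hx)⟩)

lemma pvReach_congr {matrix : List String} {V V' : List (Int × Int)} {s p : Int × Int}
    (h : ∀ x, x ∈ V ↔ x ∈ V') : pvReach matrix V s p ↔ pvReach matrix V' s p :=
  ⟨pvReach_mono (fun x hx => (h x).mpr hx), pvReach_mono (fun x hx => (h x).mp hx)⟩

lemma pv_mem_get_neighbors {matrix : List String} {r c : Int} {q : Int × Int} :
    q ∈ get_neighbors r c matrix ↔ pvAdj matrix (r, c) q := by
  have hg : get_neighbors r c matrix =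
      (DIRECTIONS.filter (fun d => on_grid (r + d.1, c + d.2) matrix &&
        same_plant_type r c (r + d.1) (c + d.2) matrix)).map
        (fun d : Int × Int => (r + d.1, c + d.2)) := by
    unfold get_neighbors
    exact pv_foldl_append_if (fun d : Int × Int => (r + d.1, c + d.2))
      (fun x => on_grid x matrix && same_plant_type r c x.1 x.2 matrix) DIRECTIONS []
  rw [hg]
  simp only [List.mem_map, List.mem_filter, DIRECTIONS, List.mem_cons, List.not_mem_nil,
    or_false, Bool.and_eq_true]
  constructor
  · rintro ⟨d, ⟨hd, hg', hs⟩, rfl⟩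
    simp only [on_grid, same_plant_type, Bool.and_eq_true, decide_eq_true_eq,
      beq_iff_eq] at hg' hs
    rcases hd with rfl | rfl | rfl | rfl <;>
      refine ⟨by simp_all [pvOnG], by simpa using hs.symm, ?_⟩ <;>
        simp [Prod.ext_iff, Int.sub_eq_add_neg]
  · rintro ⟨hgq, hchar, hoff⟩
    have hcond : ∀ d : Int × Int, (r + d.1, c + d.2) = q →
        (on_grid (r + d.1, c + d.2) matrix && same_plant_type r c (r + d.1) (c + d.2) matrix) = true := by
      intro d hd
      have h1 : r + d.1 = q.1 := congrArg Prod.fst hd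
      have h2 : c + d.2 = q.2 := congrArg Prod.snd hd
      simp only [on_grid, same_plant_type, Bool.and_eq_true, decide_eq_true_eq,
        beq_iff_eq, h1, h2]
      refine ⟨?_, hchar.symm⟩
      simp only [pvOnG] at hgq
      tauto
    rcases hoff with rfl | rfl | rfl | rfl
    · exact ⟨(1, 0), ⟨by simp, by simpa using hcond (1, 0) (by simp)⟩, by simp⟩
    · exact ⟨(-1, 0), ⟨by simp, by simpa using hcond (-1, 0) (by simp [Int.sub_eq_add_neg])⟩,
        by simp [Int.sub_eq_add_neg]⟩
    · exact ⟨(0, 1), ⟨by simp, by simpa using hcond (0, 1) (by simp)⟩, by simp⟩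
    · exact ⟨(0, -1), ⟨by simp, by simpa using hcond (0, -1) (by simp [Int.sub_eq_add_neg])⟩,
        by simp [Int.sub_eq_add_neg]⟩

-- the set a flood fill computes, characterised once for both algorithms
lemma pvRegionChar {matrix : List String} {V0 : List (Int × Int)} {s : Int × Int}
    {R vis' : List (Int × Int)}
    (hs : s ∈ R) (hsound : ∀ p ∈ R, pvReach matrix V0 s p)
    (hclos : ∀ p ∈ R, ∀ q, pvAdj matrix p q → q ∈ vis')
    (hinv : ∀ x, x ∈ vis' ↔ x ∈ V0 ∨ x ∈ R) :
    ∀ x, x ∈ R ↔ pvReach matrix V0 s x := by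
  intro x
  constructor
  · exact hsound x
  · intro hr
    induction hr with
    | refl => exact hs
    | tail _hab hbc ih =>
        rcases hbc with ⟨hadj, hnv⟩
        rcases (hinv _).mp (hclos _ ih _ hadj) with h | h
        · exact absurd h hnv
        · exact h

-- ---------- grid cardinality (fuel sufficiency) ----------

noncomputable def pvGridF (matrix : List String) : Finset (Int × Int) :=
  (Finset.Icc (0 : Int) ((matrix.length : Int) - 1)) ×ˢ (Finset.Icc (0 : Int) (pvWidth matrix - 1))

noncomputable def pvFree (matrix : List String) (vis : List (Int × Int)) : Nat :=
  ((pvGridF matrix).filter (fun p => p ∉ vis)).card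

lemma pv_mem_gridF {matrix : List String} {p : Int × Int} :
    p ∈ pvGridF matrix ↔ pvOnG matrix p := by
  simp only [pvGridF, Finset.mem_product, Finset.mem_Icc, pvOnG]
  omega

lemma pvFree_mono {matrix : List String} {vis vis' : List (Int × Int)}
    (h : ∀ x ∈ vis, x ∈ vis') : pvFree matrix vis' ≤ pvFree matrix vis := by
  apply Finset.card_le_card
  intro p hp
  simp only [Finset.mem_filter] at hp ⊢
  exact ⟨hp.1, fun hm => hp.2 (h _ hm)⟩

lemma pvFree_append_singleton {matrix : List String} {vis : List (Int × Int)} {q : Int × Int}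
    (hg : pvOnG matrix q) (hnv : q ∉ vis) :
    pvFree matrix (vis ++ [q]) + 1 = pvFree matrix vis := by
  have hset : (pvGridF matrix).filter (fun p => p ∉ vis ++ [q]) =
      ((pvGridF matrix).filter (fun p => p ∉ vis)).erase q := by
    ext p
    simp only [Finset.mem_filter, Finset.mem_erase, List.mem_append, List.mem_singleton]
    tauto
  have hq : q ∈ (pvGridF matrix).filter (fun p => p ∉ vis) := by
    simp only [Finset.mem_filter]
    exact ⟨pv_mem_gridF.mpr hg, hnv⟩
  unfold pvFree
  rw [hset, Finset.card_erase_of_mem hq]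
  have : 0 < ((pvGridF matrix).filter (fun p => p ∉ vis)).card :=
    Finset.card_pos.mpr ⟨q, hq⟩
  omega

lemma pvFree_append {matrix : List String} :
    ∀ (new vis : List (Int × Int)), new.Nodup → (∀ x ∈ new, pvOnG matrix x) →
      (∀ x ∈ new, x ∉ vis) →
      pvFree matrix (vis ++ new) + new.length = pvFree matrix vis := by
  intro new
  induction new with
  | nil => intro vis _ _ _; simp
  | cons q new ih =>
      intro vis hnd hg hdis
      have h1 : pvFree matrix ((vis ++ [q]) ++ new) + new.length = pvFree matrix (vis ++ [q]) := by
        apply ih _ (List.nodup_cons.mp hnd).2 (fun x hx => hg x (by simp [hx]))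
        intro x hx
        simp only [List.mem_append, List.mem_singleton]
        rintro (h | rfl)
        · exact hdis x (by simp [hx]) h
        · exact (List.nodup_cons.mp hnd).1 hx
      have h2 : pvFree matrix (vis ++ [q]) + 1 = pvFree matrix vis :=
        pvFree_append_singleton (hg q (by simp)) (hdis q (by simp))
      have : vis ++ q :: new = (vis ++ [q]) ++ new := by simp
      rw [this]
      simp only [List.length_cons]
      omega

lemma pvFree_le (matrix : List String) (vis : List (Int × Int)) :
    pvFree matrix vis ≤ matrix.length * (pvWidth matrix).toNat := by
  have h1 : pvFree matrix vis ≤ (pvGridF matrix).card :=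
    Finset.card_le_card (Finset.filter_subset _ _)
  have h2 : (pvGridF matrix).card = matrix.length * (pvWidth matrix).toNat := by
    simp only [pvGridF, Finset.card_product, Int.card_Icc]
    congr 1 <;> omega
  omega

-- ---------- A: the recursive dfs computes the reachable set ----------

def pvCoreOK (matrix : List String) (fuel : Nat) : Prop :=
  ∀ (s : Int × Int) (vis reg vis' : PySem.Set (Int × Int)), vis.Nodup →
    dfsCore matrix fuel s.1 s.2 vis = some (reg, vis') →
    (reg.Nodup ∧ vis'.Nodup ∧ s ∈ reg ∧
     (∀ x, x ∈ vis' ↔ x ∈ vis ∨ x ∈ reg) ∧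
     (∀ p ∈ reg, pvReach matrix vis s p) ∧
     (∀ p ∈ reg, ∀ q, pvAdj matrix p q → q ∈ vis'))

lemma pvGoOK (matrix : List String) (fuel : Nat) (hcore : pvCoreOK matrix fuel)
    (V0 : List (Int × Int)) (s : Int × Int) :
    ∀ (lst : List (Int × Int)) (reg vis reg' vis' : PySem.Set (Int × Int)),
      dfsGo matrix fuel lst reg vis = some (reg', vis') →
      vis.Nodup → reg.Nodup →
      (∀ x, x ∈ vis ↔ x ∈ V0 ∨ x ∈ reg) →
      (∀ p ∈ reg, pvReach matrix V0 s p) →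
      (∀ n ∈ lst, pvAdj matrix s n) →
      (reg'.Nodup ∧ vis'.Nodup ∧ (∀ x ∈ reg, x ∈ reg') ∧
       (∀ x, x ∈ vis' ↔ x ∈ V0 ∨ x ∈ reg') ∧
       (∀ p ∈ reg', pvReach matrix V0 s p) ∧
       (∀ n ∈ lst, n ∈ vis') ∧
       (∀ p, p ∈ reg' → p ∉ reg → ∀ q, pvAdj matrix p q → q ∈ vis')) := by
  intro lst
  induction lst with
  | nil =>
      intro reg vis reg' vis' h hvnd hrnd hinv hsound _hlst
      simp only [dfsGo, Option.some.injEq, Prod.mk.injEq] at h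
      obtain ⟨rfl, rfl⟩ := h
      exact ⟨hrnd, hvnd, fun x hx => hx, hinv, hsound, by simp,
        fun p hp hnp => absurd hp hnp⟩
  | cons n rest ih =>
      intro reg vis reg' vis' h hvnd hrnd hinv hsound hlst
      simp only [dfsGo] at h
      by_cases hmem : n ∈ vis
      · rw [if_pos hmem] at h
        obtain ⟨c1, c2, c3, c4, c5, c6, c7⟩ :=
          ih reg vis reg' vis' h hvnd hrnd hinv hsound (fun m hm => hlst m (by simp [hm]))
        refine ⟨c1, c2, c3, c4, c5, ?_, c7⟩
        intro m hm
        rcases List.mem_cons.mp hm with rfl | hm'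
        · rcases (hinv m).mp hmem with h0 | h0
          · exact (c4 m).mpr (Or.inl h0)
          · exact (c4 m).mpr (Or.inr (c3 m h0))
        · exact c6 m hm'
      · rw [if_neg hmem] at h
        rcases hc : dfsCore matrix fuel n.1 n.2 vis with _ | ⟨nreg, nvis⟩
        · simp [hc] at h
        · simp only [hc] at h
          obtain ⟨hnregnd, hnvisnd, hnin, hninv, hnsound, hnclos⟩ :=
            hcore n vis nreg nvis hvnd hc
          have hmu : ∀ y, y ∈ PySem.Set.update reg nreg ↔ y ∈ reg ∨ y ∈ nreg :=
            fun y => PySem.Set.mem_update reg nreg y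
          have hUnd : (PySem.Set.update reg nreg).Nodup := PySem.Set.nodup_update reg nreg hrnd
          have hUinv : ∀ x, x ∈ nvis ↔ x ∈ V0 ∨ x ∈ PySem.Set.update reg nreg := by
            intro x
            rw [hninv x, hinv x, hmu x]
            tauto
          have hV0vis : ∀ x ∈ V0, x ∈ vis := fun x hx => (hinv x).mpr (Or.inl hx)
          have hreachn : pvReach matrix V0 s n :=
            Relation.ReflTransGen.single ⟨hlst n (by simp), fun hx => hmem (hV0vis n hx)⟩
          have hUsound : ∀ p ∈ PySem.Set.update reg nreg, pvReach matrix V0 s p := by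
            intro p hp
            rcases (hmu p).mp hp with hp' | hp'
            · exact hsound p hp'
            · exact Relation.ReflTransGen.trans hreachn (pvReach_mono hV0vis (hnsound p hp'))
          obtain ⟨c1, c2, c3, c4, c5, c6, c7⟩ :=
            ih _ nvis reg' vis' h hnvisnd hUnd hUinv hUsound
              (fun m hm => hlst m (by simp [hm]))
          refine ⟨c1, c2, ?_, c4, c5, ?_, ?_⟩
          · intro x hx
            exact c3 x ((hmu x).mpr (Or.inl hx))
          · intro m hm
            rcases List.mem_cons.mp hm with rfl | hm'
            · exact (c4 m).mpr (Or.inr (c3 m ((hmu m).mpr (Or.inr hnin))))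
            · exact c6 m hm'
          · intro p hp hnp q hadj
            by_cases hp2 : p ∈ PySem.Set.update reg nreg
            · have hpn : p ∈ nreg := by
                rcases (hmu p).mp hp2 with h' | h'
                · exact absurd h' hnp
                · exact h'
              have hq : q ∈ nvis := hnclos p hpn q hadj
              rcases (hUinv q).mp hq with h0 | h0
              · exact (c4 q).mpr (Or.inl h0)
              · exact (c4 q).mpr (Or.inr (c3 q h0))
            · exact c7 p hp hp2 q hadj

lemma pv_core_unfold (matrix : List String) (f : Nat) (a b : Int)
    (vis : PySem.Set (Int × Int)) :
    dfsCore matrix (f + 1) a b vis =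
      dfsGo matrix f (get_neighbors a b matrix)
        (PySem.Set.add PySem.Set.empty (a, b)) (PySem.Set.add vis (a, b)) := by
  simp [dfsCore]

lemma pv_reg0_eq (a b : Int) :
    (PySem.Set.add PySem.Set.empty (a, b) : PySem.Set (Int × Int)) = [(a, b)] := by
  rfl

lemma pvCoreOK_all (matrix : List String) : ∀ fuel, pvCoreOK matrix fuel := by
  intro fuel
  induction fuel with
  | zero =>
      intro s vis reg vis' _hnd h
      simp [dfsCore] at h
  | succ f ih =>
      intro s vis reg vis' hnd h
      rw [pv_core_unfold] at h
      have hvnd : (PySem.Set.add vis (s.1, s.2)).Nodup := PySem.Set.nodup_add vis (s.1, s.2) hnd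
      have hrnd : (PySem.Set.add PySem.Set.empty (s.1, s.2) :
          PySem.Set (Int × Int)).Nodup := by
        rw [pv_reg0_eq]; simp
      have hinv0 : ∀ x, x ∈ PySem.Set.add vis (s.1, s.2) ↔
          x ∈ vis ∨ x ∈ (PySem.Set.add PySem.Set.empty (s.1, s.2) : PySem.Set (Int × Int)) := by
        intro x
        rw [pv_reg0_eq]
        simp [PySem.Set.mem_add]
      have hsound0 : ∀ p ∈ (PySem.Set.add PySem.Set.empty (s.1, s.2) :
          PySem.Set (Int × Int)), pvReach matrix vis s p := by
        intro p hp
        rw [pv_reg0_eq] at hp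
        simp only [List.mem_singleton] at hp
        subst hp
        exact Relation.ReflTransGen.refl
      have hadjlst : ∀ n ∈ get_neighbors s.1 s.2 matrix, pvAdj matrix s n := by
        intro n hn
        have := pv_mem_get_neighbors.mp hn
        simpa using this
      obtain ⟨c1, c2, c3, c4, c5, c6, c7⟩ :=
        pvGoOK matrix f ih vis s _ _ _ _ _ h hvnd hrnd hinv0 hsound0 hadjlst
      refine ⟨c1, c2, ?_, ?_, c5, ?_⟩
      · exact c3 _ (by rw [pv_reg0_eq]; simp)
      · exact c4
      · intro p hp q hadj
        by_cases hp0 : p ∈ (PySem.Set.add PySem.Set.empty (s.1, s.2) :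
            PySem.Set (Int × Int))
        · rw [pv_reg0_eq] at hp0
          simp only [List.mem_singleton] at hp0
          subst hp0
          have hq : q ∈ get_neighbors s.1 s.2 matrix := by
            apply pv_mem_get_neighbors.mpr
            simpa using hadj
          exact c6 q hq
        · exact c7 p hp hp0 q hadj

def pvCoreSuff (matrix : List String) (fuel : Nat) : Prop :=
  ∀ (s : Int × Int) (vis : PySem.Set (Int × Int)), vis.Nodup →
    pvOnG matrix s → s ∉ vis → pvFree matrix vis ≤ fuel →
    dfsCore matrix fuel s.1 s.2 vis ≠ none

lemma pvGoSuff (matrix : List String) (fuel : Nat) (hco : pvCoreOK matrix fuel)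
    (hcs : pvCoreSuff matrix fuel) :
    ∀ (lst : List (Int × Int)) (reg vis : PySem.Set (Int × Int)), vis.Nodup →
      (∀ n ∈ lst, pvOnG matrix n) → pvFree matrix vis ≤ fuel →
      dfsGo matrix fuel lst reg vis ≠ none := by
  intro lst
  induction lst with
  | nil => intro reg vis _ _ _; simp [dfsGo]
  | cons n rest ih =>
      intro reg vis hnd hong hfree
      simp only [dfsGo]
      by_cases hmem : n ∈ vis
      · rw [if_pos hmem]
        exact ih reg vis hnd (fun m hm => hong m (by simp [hm])) hfree
      · rw [if_neg hmem]
        rcases hc : dfsCore matrix fuel n.1 n.2 vis with _ | ⟨nreg, nvis⟩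
        · exact absurd hc (hcs n vis hnd (hong n (by simp)) hmem hfree)
        · obtain ⟨_, hnvisnd, _, hninv, _, _⟩ := hco n vis nreg nvis hnd hc
          apply ih _ nvis hnvisnd (fun m hm => hong m (by simp [hm]))
          exact le_trans (pvFree_mono (fun x hx => (hninv x).mpr (Or.inl hx))) hfree

lemma pvCoreSuff_all (matrix : List String) : ∀ fuel, pvCoreSuff matrix fuel := by
  intro fuel
  induction fuel with
  | zero =>
      intro s vis _hnd hg hnv hfree
      exfalso
      have hs : s ∈ (pvGridF matrix).filter (fun p => p ∉ vis) := by
        simp only [Finset.mem_filter]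
        exact ⟨pv_mem_gridF.mpr hg, hnv⟩
      have : 0 < pvFree matrix vis := Finset.card_pos.mpr ⟨s, hs⟩
      omega
  | succ f ih =>
      intro s vis hnd hg hnv hfree
      rw [pv_core_unfold]
      apply pvGoSuff matrix f (pvCoreOK_all matrix f) ih
      · exact PySem.Set.nodup_add vis (s.1, s.2) hnd
      · intro n hn
        exact (pv_mem_get_neighbors.mp hn).1
      · have hadd : (PySem.Set.add vis (s.1, s.2) : PySem.Set (Int × Int)) =
            vis ++ [(s.1, s.2)] := PySem.Set.add_of_not_mem (by simpa using hnv)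
        have := pvFree_append_singleton (matrix := matrix) (vis := vis)
          (q := (s.1, s.2)) (by simpa using hg) (by simpa using hnv)
        rw [hadd]
        omega

-- ---------- B: the stack flood fill computes the reachable set ----------

lemma pvScan (matrix : List String) (h w : Int) (hh : h = (matrix.length : Int))
    (hw : w = pvWidth matrix) (p : Int × Int) (V0 : List (Int × Int)) :
    ∀ (cand : List (Int × Int))
      (st0 : PySem.Set (Int × Int) × PySem.Set (Int × Int) × List (Int × Int)),
      (∀ x, x ∈ st0.1 ↔ x ∈ V0 ∨ x ∈ st0.2.1) →
      ∃ new : List (Int × Int),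
        cand.foldl
          (fun (st : PySem.Set (Int × Int) × PySem.Set (Int × Int) × List (Int × Int)) q =>
            if 0 ≤ q.1 ∧ q.1 < h ∧ 0 ≤ q.2 ∧ q.2 < w ∧ q ∉ st.1 ∧
               pvCharAt matrix q.1 q.2 = pvCharAt matrix p.1 p.2 then
              (PySem.Set.add st.1 q, PySem.Set.add st.2.1 q, q :: st.2.2)
            else st) st0
          = (st0.1 ++ new, st0.2.1 ++ new, new.reverse ++ st0.2.2) ∧
        new.Nodup ∧
        (∀ x ∈ new, x ∉ st0.1 ∧ x ∈ cand ∧ pvOnG matrix x ∧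
          pvCharAt matrix x.1 x.2 = pvCharAt matrix p.1 p.2) ∧
        (∀ q ∈ cand, pvOnG matrix q →
          pvCharAt matrix q.1 q.2 = pvCharAt matrix p.1 p.2 → q ∈ st0.1 ++ new) := by
  intro cand
  induction cand with
  | nil =>
      intro st0 _hcup
      exact ⟨[], by simp, by simp, by simp, by simp⟩
  | cons q cand ih =>
      intro st0 hcup
      simp only [List.foldl_cons]
      by_cases hcond : 0 ≤ q.1 ∧ q.1 < h ∧ 0 ≤ q.2 ∧ q.2 < w ∧ q ∉ st0.1 ∧
          pvCharAt matrix q.1 q.2 = pvCharAt matrix p.1 p.2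
      · rw [if_pos hcond]
        have hq1 : q ∉ st0.1 := hcond.2.2.2.2.1
        have hq2 : q ∉ st0.2.1 := fun hx => hq1 ((hcup q).mpr (Or.inr hx))
        have he1 : PySem.Set.add st0.1 q = st0.1 ++ [q] := PySem.Set.add_of_not_mem hq1
        have he2 : PySem.Set.add st0.2.1 q = st0.2.1 ++ [q] := PySem.Set.add_of_not_mem hq2
        have hcup1 : ∀ x, x ∈ (PySem.Set.add st0.1 q, PySem.Set.add st0.2.1 q, q :: st0.2.2).1 ↔
            x ∈ V0 ∨ x ∈ (PySem.Set.add st0.1 q, PySem.Set.add st0.2.1 q, q :: st0.2.2).2.1 := by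
          intro x
          simp only [he1, he2, List.mem_append, List.mem_singleton]
          rw [hcup x]
          tauto
        obtain ⟨new1, heq, hnd1, hfacts1, hcover1⟩ := ih _ hcup1
        refine ⟨q :: new1, ?_, ?_, ?_, ?_⟩
        · rw [heq]
          simp [he1, he2]
        · refine List.nodup_cons.mpr ⟨?_, hnd1⟩
          intro hq
          have := (hfacts1 q hq).1
          simp [he1] at this
        · intro x hx
          rcases List.mem_cons.mp hx with rfl | hx'
          · exact ⟨hq1, by simp, ⟨hcond.1, by rw [hh] at hcond; exact hcond.2.1,
              hcond.2.2.1, by rw [hw] at hcond; exact hcond.2.2.2.1⟩, hcond.2.2.2.2.2⟩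
          · obtain ⟨ha, hb, hc', hd⟩ := hfacts1 x hx'
            refine ⟨?_, by simp [hb], hc', hd⟩
            intro hxin
            exact ha (by simp [he1, hxin])
        · intro q' hq' hong hchar
          rcases List.mem_cons.mp hq' with rfl | hq''
          · simp
          · have := hcover1 q' hq'' hong hchar
            simp only [he1] at this
            simp only [List.mem_append, List.mem_cons] at this ⊢
            tauto
      · rw [if_neg hcond]
        obtain ⟨new1, heq, hnd1, hfacts1, hcover1⟩ := ih st0 hcup
        refine ⟨new1, heq, hnd1, ?_, ?_⟩
        · intro x hx
          obtain ⟨ha, hb, hc', hd⟩ := hfacts1 x hx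
          exact ⟨ha, by simp [hb], hc', hd⟩
        · intro q' hq' hong hchar
          rcases List.mem_cons.mp hq' with rfl | hq''
          · by_cases hqin : q' ∈ st0.1
            · simp [hqin]
            · exfalso
              apply hcond
              rw [hh, hw]
              exact ⟨hong.1, hong.2.1, hong.2.2.1, hong.2.2.2, hqin, hchar⟩
          · exact hcover1 q' hq'' hong hchar

lemma pvLoopOK (matrix : List String) (V0 : List (Int × Int)) (s : Int × Int) :
    ∀ (fuel : Nat) (stack : List (Int × Int)) (reg vis reg' vis' : PySem.Set (Int × Int)),
      fillLoop matrix (matrix.length : Int) (pvWidth matrix) fuel stack reg vis = some (reg', vis') →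
      reg.Nodup → vis.Nodup → stack.Nodup →
      (∀ x, x ∈ vis ↔ x ∈ V0 ∨ x ∈ reg) →
      (∀ x ∈ stack, x ∈ reg) →
      (∀ p ∈ reg, pvReach matrix V0 s p) →
      (∀ p ∈ reg, p ∉ stack → ∀ q, pvAdj matrix p q → q ∈ vis) →
      (reg'.Nodup ∧ vis'.Nodup ∧ (∀ x ∈ reg, x ∈ reg') ∧
       (∀ x, x ∈ vis' ↔ x ∈ V0 ∨ x ∈ reg') ∧
       (∀ p ∈ reg', pvReach matrix V0 s p) ∧
       (∀ p ∈ reg', ∀ q, pvAdj matrix p q → q ∈ vis')) := by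
  intro fuel
  induction fuel with
  | zero =>
      intro stack reg vis reg' vis' h hrnd hvnd _hsnd hinv hsr hsound hclos
      cases stack with
      | nil =>
          simp only [fillLoop, Option.some.injEq, Prod.mk.injEq] at h
          obtain ⟨rfl, rfl⟩ := h
          exact ⟨hrnd, hvnd, fun x hx => hx, hinv, hsound,
            fun p hp q hq => hclos p hp (by simp) q hq⟩
      | cons p stack => simp [fillLoop] at h
  | succ f ih =>
      intro stack reg vis reg' vis' h hrnd hvnd hsnd hinv hsr hsound hclos
      cases stack with
      | nil =>
          simp only [fillLoop, Option.some.injEq, Prod.mk.injEq] at h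
          obtain ⟨rfl, rfl⟩ := h
          exact ⟨hrnd, hvnd, fun x hx => hx, hinv, hsound,
            fun p hp q hq => hclos p hp (by simp) q hq⟩
      | cons p rest =>
          simp only [fillLoop] at h
          obtain ⟨new, heq, hnewnd, hnewf, hcover⟩ :=
            pvScan matrix (matrix.length : Int) (pvWidth matrix) rfl rfl p V0
              [(p.1 + 1, p.2), (p.1 - 1, p.2), (p.1, p.2 + 1), (p.1, p.2 - 1)]
              (vis, reg, rest) hinv
          rw [heq] at h
          have hregvis : ∀ x ∈ reg, x ∈ vis := fun x hx => (hinv x).mpr (Or.inr hx)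
          have hV0vis : ∀ x ∈ V0, x ∈ vis := fun x hx => (hinv x).mpr (Or.inl hx)
          have hpreg : p ∈ reg := hsr p (by simp)
          have hadjnew : ∀ x ∈ new, pvAdj matrix p x := by
            intro x hx
            obtain ⟨_, hcand, hong, hchar⟩ := hnewf x hx
            refine ⟨hong, hchar, ?_⟩
            simpa using hcand
          have hrestnd := (List.nodup_cons.mp hsnd).2
          have hpnotrest := (List.nodup_cons.mp hsnd).1
          have hnewvis : ∀ x ∈ new, x ∉ vis := fun x hx => (hnewf x hx).1
          -- invariants for the recursive call
          have ihreg : (reg ++ new).Nodup :=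
            List.Nodup.append hrnd hnewnd
              (fun x hx hx' => hnewvis x hx' (hregvis x hx))
          have ihvis : (vis ++ new).Nodup :=
            List.Nodup.append hvnd hnewnd (fun x hx hx' => hnewvis x hx' hx)
          have ihstack : (new.reverse ++ rest).Nodup :=
            List.Nodup.append (List.nodup_reverse.mpr hnewnd) hrestnd
              (fun x hx hx' => hnewvis x (List.mem_reverse.mp hx)
                (hregvis x (hsr x (by simp [hx']))))
          have ihinv : ∀ x, x ∈ vis ++ new ↔ x ∈ V0 ∨ x ∈ reg ++ new := by
            intro x
            simp only [List.mem_append]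
            rw [hinv x]
            tauto
          have ihsr : ∀ x ∈ new.reverse ++ rest, x ∈ reg ++ new := by
            intro x hx
            simp only [List.mem_append, List.mem_reverse] at hx ⊢
            rcases hx with hx | hx
            · exact Or.inr hx
            · exact Or.inl (hsr x (by simp [hx]))
          have ihsound : ∀ q ∈ reg ++ new, pvReach matrix V0 s q := by
            intro q hq
            rcases List.mem_append.mp hq with hq | hq
            · exact hsound q hq
            · exact Relation.ReflTransGen.tail (hsound p hpreg)
                ⟨hadjnew q hq, fun hx => hnewvis q hq (hV0vis q hx)⟩
          have ihclos : ∀ p1 ∈ reg ++ new, p1 ∉ new.reverse ++ rest →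
              ∀ q, pvAdj matrix p1 q → q ∈ vis ++ new := by
            intro p1 hp1 hnp1 q hadj
            rcases List.mem_append.mp hp1 with hp1' | hp1'
            · by_cases hpp : p1 = p
              · subst hpp
                obtain ⟨hong, hchar, hoff⟩ := hadj
                have hqc : q ∈ [(p1.1 + 1, p1.2), (p1.1 - 1, p1.2),
                    (p1.1, p1.2 + 1), (p1.1, p1.2 - 1)] := by
                  simpa using hoff
                exact hcover q hqc hong hchar
              · have hnr : p1 ∉ rest := fun hx => hnp1 (by simp [hx])
                have := hclos p1 hp1' (by
                  simp only [List.mem_cons]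
                  rintro (h' | h')
                  · exact hpp h'
                  · exact hnr h') q hadj
                simp [this]
            · exfalso
              exact hnp1 (by simp [List.mem_reverse, hp1'])
          obtain ⟨c1, c2, c3, c4, c5, c6⟩ :=
            ih (new.reverse ++ rest) (reg ++ new) (vis ++ new) reg' vis' h
              ihreg ihvis ihstack ihinv ihsr ihsound ihclos
          exact ⟨c1, c2, fun x hx => c3 x (by simp [hx]), c4, c5, c6⟩

lemma pvLoopSuff (matrix : List String) :
    ∀ (fuel : Nat) (stack : List (Int × Int)) (reg vis : PySem.Set (Int × Int)),
      (∀ x, x ∈ vis ↔ x ∈ vis ∨ x ∈ reg) →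
      2 * pvFree matrix vis + stack.length < fuel →
      fillLoop matrix (matrix.length : Int) (pvWidth matrix) fuel stack reg vis ≠ none := by
  intro fuel
  induction fuel with
  | zero =>
      intro stack reg vis _hcup hlt
      exact absurd hlt (by omega)
  | succ f ih =>
      intro stack reg vis hcup hlt
      cases stack with
      | nil => simp [fillLoop]
      | cons p rest =>
          simp only [fillLoop]
          obtain ⟨new, heq, hnewnd, hnewf, _⟩ :=
            pvScan matrix (matrix.length : Int) (pvWidth matrix) rfl rfl p vis
              [(p.1 + 1, p.2), (p.1 - 1, p.2), (p.1, p.2 + 1), (p.1, p.2 - 1)]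
              (vis, reg, rest) hcup
          rw [heq]
          apply ih
          · intro x
            have hrv : x ∈ reg → x ∈ vis := fun hx => (hcup x).mpr (Or.inr hx)
            simp only [List.mem_append]
            constructor
            · exact Or.inl
            · rintro ((h | h) | h | h)
              · exact Or.inl h
              · exact Or.inr h
              · exact Or.inl (hrv h)
              · exact Or.inr h
          · have hfe : pvFree matrix (vis ++ new) + new.length = pvFree matrix vis :=
              pvFree_append new vis hnewnd (fun x hx => (hnewf x hx).2.2.1)
                (fun x hx => (hnewf x hx).1)
            simp only [List.length_append, List.length_reverse]
            simp only [List.length_cons] at hlt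
            omega

-- ---------- sides: per-cell corner count = per-vertex classification ----------

def pvCC (S : List (Int × Int)) (p : Int × Int) : Int :=
  (if (p.1 - 1, p.2) ∉ S ∧ (p.1, p.2 - 1) ∉ S then 1 else 0) +
  (if (p.1 + 1, p.2) ∉ S ∧ (p.1, p.2 - 1) ∉ S then 1 else 0) +
  (if (p.1 - 1, p.2) ∉ S ∧ (p.1, p.2 + 1) ∉ S then 1 else 0) +
  (if (p.1 + 1, p.2) ∉ S ∧ (p.1, p.2 + 1) ∉ S then 1 else 0) +
  (if (p.1 - 1, p.2) ∈ S ∧ (p.1, p.2 - 1) ∈ S ∧ (p.1 - 1, p.2 - 1) ∉ S then 1 else 0) +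
  (if (p.1 + 1, p.2) ∈ S ∧ (p.1, p.2 - 1) ∈ S ∧ (p.1 + 1, p.2 - 1) ∉ S then 1 else 0) +
  (if (p.1 - 1, p.2) ∈ S ∧ (p.1, p.2 + 1) ∈ S ∧ (p.1 - 1, p.2 + 1) ∉ S then 1 else 0) +
  (if (p.1 + 1, p.2) ∈ S ∧ (p.1, p.2 + 1) ∈ S ∧ (p.1 + 1, p.2 + 1) ∉ S then 1 else 0)

def pvVC (S : List (Int × Int)) (v : Int × Int) : Int :=
  let nw := decide ((v.1 - 1, v.2 - 1) ∈ S)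
  let ne := decide ((v.1 - 1, v.2) ∈ S)
  let sw := decide ((v.1, v.2 - 1) ∈ S)
  let se := decide ((v.1, v.2) ∈ S)
  let n : Int := (if nw then 1 else 0) + (if ne then 1 else 0) +
                 (if sw then 1 else 0) + (if se then 1 else 0)
  if n = 1 ∨ n = 3 then 1 else if n = 2 ∧ nw = se then 2 else 0

-- vertex k of cell p, and the cell whose vertex k is v
def pvVtx (p : Int × Int) (k : Fin 4) : Int × Int :=
  match k with
  | 0 => (p.1, p.2)
  | 1 => (p.1, p.2 + 1)
  | 2 => (p.1 + 1, p.2)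
  | 3 => (p.1 + 1, p.2 + 1)

def pvCellOf (v : Int × Int) (k : Fin 4) : Int × Int :=
  match k with
  | 0 => (v.1, v.2)
  | 1 => (v.1, v.2 - 1)
  | 2 => (v.1 - 1, v.2)
  | 3 => (v.1 - 1, v.2 - 1)

-- contribution of cell p at its vertex k (one outer + one inner test of A)
def pvG (S : List (Int × Int)) (p : Int × Int) (k : Fin 4) : Int :=
  match k with
  | 0 => (if (p.1 - 1, p.2) ∉ S ∧ (p.1, p.2 - 1) ∉ S then 1 else 0) +
         (if (p.1 - 1, p.2) ∈ S ∧ (p.1, p.2 - 1) ∈ S ∧ (p.1 - 1, p.2 - 1) ∉ S then 1 else 0)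
  | 1 => (if (p.1 - 1, p.2) ∉ S ∧ (p.1, p.2 + 1) ∉ S then 1 else 0) +
         (if (p.1 - 1, p.2) ∈ S ∧ (p.1, p.2 + 1) ∈ S ∧ (p.1 - 1, p.2 + 1) ∉ S then 1 else 0)
  | 2 => (if (p.1 + 1, p.2) ∉ S ∧ (p.1, p.2 - 1) ∉ S then 1 else 0) +
         (if (p.1 + 1, p.2) ∈ S ∧ (p.1, p.2 - 1) ∈ S ∧ (p.1 + 1, p.2 - 1) ∉ S then 1 else 0)
  | 3 => (if (p.1 + 1, p.2) ∉ S ∧ (p.1, p.2 + 1) ∉ S then 1 else 0) +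
         (if (p.1 + 1, p.2) ∈ S ∧ (p.1, p.2 + 1) ∈ S ∧ (p.1 + 1, p.2 + 1) ∉ S then 1 else 0)

lemma pvCC_decomp (S : List (Int × Int)) (p : Int × Int) :
    pvCC S p = ∑ k : Fin 4, pvG S p k := by
  simp only [Fin.sum_univ_four, pvCC, pvG]
  ring

lemma pvVtx_cellOf (p : Int × Int) (k : Fin 4) : pvCellOf (pvVtx p k) k = p := by
  fin_cases k <;> simp [pvVtx, pvCellOf]

lemma pvCellOf_vtx (v : Int × Int) (k : Fin 4) : pvVtx (pvCellOf v k) k = v := by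
  fin_cases k <;> simp [pvVtx, pvCellOf]

lemma pvVC_recomp (S : List (Int × Int)) (v : Int × Int) :
    (∑ k : Fin 4, if pvCellOf v k ∈ S then pvG S (pvCellOf v k) k else 0) = pvVC S v := by
  by_cases h1 : ((v.1 - 1, v.2 - 1) ∈ S) <;> by_cases h2 : ((v.1 - 1, v.2) ∈ S) <;>
    by_cases h3 : ((v.1, v.2 - 1) ∈ S) <;> by_cases h4 : ((v.1, v.2) ∈ S) <;>
      simp [pvVC, pvG, pvCellOf, Fin.sum_univ_four, h1, h2, h3, h4,
        sub_add_cancel]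

lemma pv_corner_sum (S : List (Int × Int)) (V : Finset (Int × Int))
    (hv : ∀ v, v ∈ V ↔ ∃ p ∈ S, ∃ k : Fin 4, v = pvVtx p k) :
    ∑ p ∈ S.toFinset, pvCC S p = ∑ v ∈ V, pvVC S v := by
  rw [Finset.sum_congr rfl (fun p _ => pvCC_decomp S p), ← Finset.sum_product']
  have h1 : ∑ x ∈ S.toFinset ×ˢ (Finset.univ : Finset (Fin 4)), pvG S x.1 x.2 =
      ∑ y ∈ ((V ×ˢ (Finset.univ : Finset (Fin 4))).filter
          (fun y => pvCellOf y.1 y.2 ∈ S)),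
        (if pvCellOf y.1 y.2 ∈ S then pvG S (pvCellOf y.1 y.2) y.2 else 0) := by
    apply Finset.sum_nbij' (i := fun x => (pvVtx x.1 x.2, x.2))
      (j := fun y => (pvCellOf y.1 y.2, y.2))
    · intro a ha
      simp only [Finset.mem_product, List.mem_toFinset, Finset.mem_univ, and_true] at ha
      simp only [Finset.mem_filter, Finset.mem_product, Finset.mem_univ, and_true]
      rw [pvVtx_cellOf]
      exact ⟨(hv _).mpr ⟨a.1, ha, a.2, rfl⟩, ha⟩
    · intro b hb
      simp only [Finset.mem_filter] at hb
      simp only [Finset.mem_product, List.mem_toFinset, Finset.mem_univ, and_true]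
      exact hb.2
    · intro a _
      simp [pvVtx_cellOf]
    · intro b _
      simp [pvCellOf_vtx]
    · intro a ha
      simp only [Finset.mem_product, List.mem_toFinset, Finset.mem_univ, and_true] at ha
      rw [pvVtx_cellOf, if_pos ha]
  rw [h1, Finset.sum_filter]
  have h3 : ∀ y ∈ V ×ˢ (Finset.univ : Finset (Fin 4)),
      (if pvCellOf y.1 y.2 ∈ S then
        (if pvCellOf y.1 y.2 ∈ S then pvG S (pvCellOf y.1 y.2) y.2 else 0) else 0) =
      (if pvCellOf y.1 y.2 ∈ S then pvG S (pvCellOf y.1 y.2) y.2 else 0) := by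
    intro y _
    split_ifs <;> rfl
  rw [Finset.sum_congr rfl h3, Finset.sum_product'
    (f := fun (v : Int × Int) (k : Fin 4) =>
      if pvCellOf v k ∈ S then pvG S (pvCellOf v k) k else 0)]
  exact Finset.sum_congr rfl (fun v _ => pvVC_recomp S v)

lemma pv_count_corners_eq (S : PySem.Set (Int × Int)) (h : S.Nodup) :
    count_corners S = ∑ p ∈ S.toFinset, pvCC S p := by
  have hfun : (fun (num_corners : Int) (p : Int × Int) =>
      let r := p.1; let c := p.2
      let o1 : Int := if (r - 1, c) ∉ S ∧ (r, c - 1) ∉ S then 1 else 0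
      let o2 : Int := if (r + 1, c) ∉ S ∧ (r, c - 1) ∉ S then 1 else 0
      let o3 : Int := if (r - 1, c) ∉ S ∧ (r, c + 1) ∉ S then 1 else 0
      let o4 : Int := if (r + 1, c) ∉ S ∧ (r, c + 1) ∉ S then 1 else 0
      let i1 : Int := if (r - 1, c) ∈ S ∧ (r, c - 1) ∈ S ∧ (r - 1, c - 1) ∉ S then 1 else 0
      let i2 : Int := if (r + 1, c) ∈ S ∧ (r, c - 1) ∈ S ∧ (r + 1, c - 1) ∉ S then 1 else 0
      let i3 : Int := if (r - 1, c) ∈ S ∧ (r, c + 1) ∈ S ∧ (r - 1, c + 1) ∉ S then 1 else 0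
      let i4 : Int := if (r + 1, c) ∈ S ∧ (r, c + 1) ∈ S ∧ (r + 1, c + 1) ∉ S then 1 else 0
      num_corners + o1 + o2 + o3 + o4 + i1 + i2 + i3 + i4) =
      (fun (acc : Int) (p : Int × Int) => acc + pvCC S p) := by
    funext acc p
    simp only [pvCC]
    ring
  unfold count_corners
  rw [hfun, PySem.List.foldl_add, List.sum_toFinset _ h, zero_add]

def pvCorners (S : PySem.Set (Int × Int)) : PySem.Set (Int × Int) :=
  S.foldl (fun cs p =>
    PySem.Set.update cs [(p.1, p.2), (p.1, p.2 + 1), (p.1 + 1, p.2), (p.1 + 1, p.2 + 1)])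
    PySem.Set.empty

lemma pv_mem4 (p x : Int × Int) :
    x ∈ [(p.1, p.2), (p.1, p.2 + 1), (p.1 + 1, p.2), (p.1 + 1, p.2 + 1)] ↔
      ∃ k : Fin 4, x = pvVtx p k := by
  constructor
  · intro hx
    rcases (by simpa using hx : x = (p.1, p.2) ∨ x = (p.1, p.2 + 1) ∨
        x = (p.1 + 1, p.2) ∨ x = (p.1 + 1, p.2 + 1)) with rfl | rfl | rfl | rfl
    exacts [⟨0, rfl⟩, ⟨1, rfl⟩, ⟨2, rfl⟩, ⟨3, rfl⟩]
  · rintro ⟨k, rfl⟩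
    fin_cases k <;> simp [pvVtx]

lemma pv_foldl_update_nodup :
    ∀ (l : List (Int × Int)) (init : PySem.Set (Int × Int)), init.Nodup →
      (l.foldl (fun cs p => PySem.Set.update cs
        [(p.1, p.2), (p.1, p.2 + 1), (p.1 + 1, p.2), (p.1 + 1, p.2 + 1)]) init).Nodup := by
  intro l
  induction l with
  | nil => intro init h; exact h
  | cons p l ih => intro init h; exact ih _ (PySem.Set.nodup_update _ _ h)

lemma pv_foldl_update_mem :
    ∀ (l : List (Int × Int)) (init : PySem.Set (Int × Int)) (x : Int × Int),
      x ∈ l.foldl (fun cs p => PySem.Set.update cs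
        [(p.1, p.2), (p.1, p.2 + 1), (p.1 + 1, p.2), (p.1 + 1, p.2 + 1)]) init ↔
      x ∈ init ∨ ∃ p ∈ l, ∃ k : Fin 4, x = pvVtx p k := by
  intro l
  induction l with
  | nil => intro init x; simp
  | cons p l ih =>
      intro init x
      simp only [List.foldl_cons]
      rw [ih]
      have hmu : x ∈ PySem.Set.update init
          [(p.1, p.2), (p.1, p.2 + 1), (p.1 + 1, p.2), (p.1 + 1, p.2 + 1)] ↔
          x ∈ init ∨ x ∈ [(p.1, p.2), (p.1, p.2 + 1), (p.1 + 1, p.2), (p.1 + 1, p.2 + 1)] :=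
        PySem.Set.mem_update init _ x
      rw [hmu, pv_mem4]
      simp only [List.mem_cons]
      constructor
      · rintro ((h | h) | ⟨q, hq, k, rfl⟩)
        · exact Or.inl h
        · exact Or.inr ⟨p, Or.inl rfl, h⟩
        · exact Or.inr ⟨q, Or.inr hq, k, rfl⟩
      · rintro (h | ⟨q, (rfl | hq), k, rfl⟩)
        · exact Or.inl (Or.inl h)
        · exact Or.inl (Or.inr ⟨k, rfl⟩)
        · exact Or.inr ⟨q, hq, k, rfl⟩

lemma pv_mem_corners' (S : PySem.Set (Int × Int)) (x : Int × Int) :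
    x ∈ pvCorners S ↔ ∃ p ∈ S, ∃ k : Fin 4, x = pvVtx p k := by
  unfold pvCorners
  rw [pv_foldl_update_mem]
  simp [PySem.Set.empty]

lemma pv_count_sides_eq (S : PySem.Set (Int × Int)) :
    count_sides S = ∑ v ∈ (pvCorners S).toFinset, pvVC S v := by
  have h0 : count_sides S = (pvCorners S).foldl (fun sides v =>
      let nw := decide ((v.1 - 1, v.2 - 1) ∈ S)
      let ne := decide ((v.1 - 1, v.2) ∈ S)
      let sw := decide ((v.1, v.2 - 1) ∈ S)
      let se := decide ((v.1, v.2) ∈ S)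
      let n : Int := (if nw then 1 else 0) + (if ne then 1 else 0) +
                     (if sw then 1 else 0) + (if se then 1 else 0)
      if n = 1 ∨ n = 3 then sides + 1
      else if n = 2 ∧ nw = se then sides + 2
      else sides) 0 := rfl
  have hfun : (fun (sides : Int) (v : Int × Int) =>
      let nw := decide ((v.1 - 1, v.2 - 1) ∈ S)
      let ne := decide ((v.1 - 1, v.2) ∈ S)
      let sw := decide ((v.1, v.2 - 1) ∈ S)
      let se := decide ((v.1, v.2) ∈ S)
      let n : Int := (if nw then 1 else 0) + (if ne then 1 else 0) +
                     (if sw then 1 else 0) + (if se then 1 else 0)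
      if n = 1 ∨ n = 3 then sides + 1
      else if n = 2 ∧ nw = se then sides + 2
      else sides) = (fun (acc : Int) (v : Int × Int) => acc + pvVC S v) := by
    funext acc v
    simp only [pvVC]
    split_ifs <;> ring
  have hnd : (pvCorners S).Nodup := pv_foldl_update_nodup S PySem.Set.empty (by simp)
  rw [h0, hfun, PySem.List.foldl_add, List.sum_toFinset _ hnd, zero_add]

lemma pv_sides_eq (SA SB : List (Int × Int)) (hA : SA.Nodup) (_hB : SB.Nodup)
    (hm : ∀ x, x ∈ SA ↔ x ∈ SB) : count_corners SA = count_sides SB := by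
  rw [pv_count_corners_eq SA hA, pv_count_sides_eq SB]
  have e : ∀ x : Int × Int, decide (x ∈ SB) = decide (x ∈ SA) :=
    fun x => decide_eq_decide.mpr (hm x).symm
  have hVC : ∀ v, pvVC SB v = pvVC SA v := by
    intro v
    simp only [pvVC, e]
  rw [Finset.sum_congr rfl (fun v _ => hVC v)]
  apply pv_corner_sum SA
  intro v
  rw [List.mem_toFinset, pv_mem_corners' SB v]
  constructor
  · rintro ⟨p, hp, k, hk⟩
    exact ⟨p, (hm p).mpr hp, k, hk⟩
  · rintro ⟨p, hp, k, hk⟩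
    exact ⟨p, (hm p).mp hp, k, hk⟩

-- ---------- top level ----------

def pvSt (a b : Int × PySem.Set (Int × Int)) : Prop :=
  a.1 = b.1 ∧ a.2.Nodup ∧ b.2.Nodup ∧ (∀ x, x ∈ a.2 ↔ x ∈ b.2)

lemma pvCellStep (matrix : List String) (r c : Int)
    (hr0 : 0 ≤ r) (hr1 : r < (matrix.length : Int))
    (hc0 : 0 ≤ c) (hc1 : c < pvWidth matrix)
    (a b : Int × PySem.Set (Int × Int)) (hab : pvSt a b) :
    pvSt
      (if (r, c) ∈ a.2 then a else
        match dfsCore matrix (matrix.length * (pvWidth matrix).toNat + 1) r c a.2 with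
        | none => a
        | some (region_positions, visited) =>
            (a.1 + PySem.Set.len region_positions * count_corners region_positions, visited))
      (if (r, c) ∈ b.2 then b else
        match fillLoop matrix (matrix.length : Int) (pvWidth matrix)
            (2 * matrix.length * (pvWidth matrix).toNat + 2) [(r, c)]
            (PySem.Set.add PySem.Set.empty (r, c)) (PySem.Set.add b.2 (r, c)) with
        | none => b
        | some (region, visited) =>
            (b.1 + PySem.Set.len region * count_sides region, visited)) := by
  obtain ⟨hp, hand, hbnd, hmem⟩ := hab
  by_cases hin : (r, c) ∈ a.2
  · rw [if_pos hin, if_pos ((hmem _).mp hin)]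
    exact ⟨hp, hand, hbnd, hmem⟩
  · have hinb : (r, c) ∉ b.2 := fun h => hin ((hmem _).mpr h)
    rw [if_neg hin, if_neg hinb]
    have hong : pvOnG matrix (r, c) := ⟨hr0, hr1, hc0, hc1⟩
    have hfA : pvFree matrix a.2 ≤ matrix.length * (pvWidth matrix).toNat :=
      pvFree_le matrix a.2
    have hA := pvCoreSuff_all matrix (matrix.length * (pvWidth matrix).toNat + 1)
      (r, c) a.2 hand hong hin (by omega)
    rcases hca : dfsCore matrix (matrix.length * (pvWidth matrix).toNat + 1) r c a.2
      with _ | ⟨regA, visA⟩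
    · exact absurd hca hA
    · have hfB0 : pvFree matrix (PySem.Set.add b.2 (r, c)) + 1 = pvFree matrix b.2 := by
        rw [PySem.Set.add_of_not_mem hinb]
        exact pvFree_append_singleton hong hinb
      have hfB1 : pvFree matrix b.2 ≤ matrix.length * (pvWidth matrix).toNat :=
        pvFree_le matrix b.2
      have hcupB : ∀ x, x ∈ (PySem.Set.add b.2 (r, c) : PySem.Set (Int × Int)) ↔
          x ∈ PySem.Set.add b.2 (r, c) ∨
            x ∈ (PySem.Set.add PySem.Set.empty (r, c) : PySem.Set (Int × Int)) := by
        intro x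
        rw [pv_reg0_eq]
        simp only [List.mem_singleton]
        constructor
        · exact Or.inl
        · rintro (h | rfl)
          · exact h
          · exact (PySem.Set.mem_add _ _ _).mpr (Or.inr rfl)
      have hB := pvLoopSuff matrix (2 * matrix.length * (pvWidth matrix).toNat + 2)
        [(r, c)] (PySem.Set.add PySem.Set.empty (r, c)) (PySem.Set.add b.2 (r, c))
        hcupB (by
          have h2n : 2 * matrix.length * (pvWidth matrix).toNat =
              2 * (matrix.length * (pvWidth matrix).toNat) := by ring
          simp only [List.length_singleton]
          omega)
      rcases hcb : fillLoop matrix (matrix.length : Int) (pvWidth matrix)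
          (2 * matrix.length * (pvWidth matrix).toNat + 2) [(r, c)]
          (PySem.Set.add PySem.Set.empty (r, c)) (PySem.Set.add b.2 (r, c))
        with _ | ⟨regB, visB⟩
      · exact absurd hcb hB
      · obtain ⟨hAnd, hAvnd, hAs, hAinv, hAsound, hAclos⟩ :=
          pvCoreOK_all matrix (matrix.length * (pvWidth matrix).toNat + 1)
            (r, c) a.2 regA visA hand hca
        have hAchar := pvRegionChar hAs hAsound hAclos hAinv
        have hBreg0nd : (PySem.Set.add PySem.Set.empty (r, c) :
            PySem.Set (Int × Int)).Nodup := by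
          rw [pv_reg0_eq]; simp
        have hBinv0 : ∀ x, x ∈ (PySem.Set.add b.2 (r, c) : PySem.Set (Int × Int)) ↔
            x ∈ b.2 ∨ x ∈ (PySem.Set.add PySem.Set.empty (r, c) : PySem.Set (Int × Int)) := by
          intro x
          rw [pv_reg0_eq]
          simp [PySem.Set.mem_add]
        have hBsr : ∀ x ∈ [(r, c)], x ∈ (PySem.Set.add PySem.Set.empty (r, c) :
            PySem.Set (Int × Int)) := by
          intro x hx
          rw [pv_reg0_eq]
          simpa using hx
        have hBsound0 : ∀ q ∈ (PySem.Set.add PySem.Set.empty (r, c) :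
            PySem.Set (Int × Int)), pvReach matrix b.2 (r, c) q := by
          intro q hq
          rw [pv_reg0_eq] at hq
          simp only [List.mem_singleton] at hq
          subst hq
          exact Relation.ReflTransGen.refl
        have hBclos0 : ∀ q ∈ (PySem.Set.add PySem.Set.empty (r, c) :
            PySem.Set (Int × Int)), q ∉ [(r, c)] →
            ∀ q', pvAdj matrix q q' → q' ∈ (PySem.Set.add b.2 (r, c) :
              PySem.Set (Int × Int)) := by
          intro q hq hnq
          rw [pv_reg0_eq] at hq
          simp only [List.mem_singleton] at hq
          exact absurd (by simp [hq]) hnq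
        obtain ⟨hBnd, hBvnd, hBsub, hBinv, hBsound, hBclos⟩ :=
          pvLoopOK matrix b.2 (r, c) (2 * matrix.length * (pvWidth matrix).toNat + 2)
            [(r, c)] (PySem.Set.add PySem.Set.empty (r, c)) (PySem.Set.add b.2 (r, c))
            regB visB hcb hBreg0nd (PySem.Set.nodup_add b.2 (r, c) hbnd) (by simp)
            hBinv0 hBsr hBsound0 hBclos0
        have hBs : (r, c) ∈ regB := hBsub (r, c) (by rw [pv_reg0_eq]; simp)
        have hBchar := pvRegionChar hBs hBsound hBclos hBinv
        have hRR : ∀ x, x ∈ regA ↔ x ∈ regB := by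
          intro x
          rw [hAchar x, hBchar x]
          exact pvReach_congr hmem
        have hperm : regA.Perm regB :=
          (List.perm_ext_iff_of_nodup hAnd hBnd).mpr hRR
        dsimp only
        refine ⟨?_, hAvnd, hBvnd, ?_⟩
        · have hlen : PySem.Set.len regA = PySem.Set.len regB := by
            simp [PySem.Set.len, hperm.length_eq]
          have hsides : count_corners regA = count_sides regB :=
            pv_sides_eq regA regB hAnd hBnd hRR
          rw [hp, hlen, hsides]
        · intro x
          rw [hAinv x, hBinv x, hmem x, hRR x]

-- ===== VERDICT (by name: the statement is the Claim_ definition above) =====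
theorem calculate_fencing_price_spec : Claim_equal_calculate_fencing_price := by
  intro matrix _hdom _hpre
  unfold Spec_calculate_fencing_price calculate_fencing_price calculate_fencing_price_alt
  refine (pv_foldl_rel pvSt _ _ (PySem.List.pyRange 0 (matrix.length : Int) 1)
      ((0 : Int), (PySem.Set.empty : PySem.Set (Int × Int)))
      ((0 : Int), (PySem.Set.empty : PySem.Set (Int × Int)))
      ⟨rfl, List.nodup_nil, List.nodup_nil, fun _ => Iff.rfl⟩ ?_).1
  intro a b r hr hab
  refine pv_foldl_rel pvSt _ _ (PySem.List.pyRange 0 (pvWidth matrix) 1) a b hab ?_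
  intro a' b' c hc hab'
  have hrb := (PySem.List.mem_pyRange_one).mp hr
  have hcb := (PySem.List.mem_pyRange_one).mp hc
  exact pvCellStep matrix r c hrb.1 hrb.2 hcb.1 hcb.2 a' b' hab'
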